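-- pv_equiv track=rewrite | github.com/Bhare8972/LOFAR-LIM | LIM_scripts/find_all_PSETST2.py | make_pulse_combos
-- ===== SOURCE A (Python) =====
-- def make_pulse_combos( station_list, pulse_dict ):
--     solutions = [[]]
--     for sname in station_list:
--         new_solutions = []
--
--         for s in solutions:
--             for new_pulse in pulse_dict[sname]:
--                 new_s = list(s)
--                 new_s.append( new_pulse )
--                 new_solutions.append( new_s )
--
--         solutions = new_solutions
--
--     return solutions
-- ===== SOURCE B (Python) =====
-- def make_pulse_combos(station_list, pulse_dict):
--     if not station_list:
--         return [[]]
--     first, rest = station_list[0], station_list[1:]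
--     tails = make_pulse_combos(rest, pulse_dict)
--     return [[p] + tail for p in pulse_dict[first] for tail in tails]
-- ===== Notes on version B (the rewrite author's own statement) =====
-- stated objective: alternative
-- what changed: Replaces the iterative rebuild-all-partial-solutions loop (quadratic recopying of prefixes) by a recursion over station_list that computes the tails once and prepends each pulse of the first station; the first station still varies slowest so the order is identical.
-- outside the precondition, e.g. on make_pulse_combos(['a', 'b'], {'a': []}): A returns [], B raises KeyError
import Mathlib
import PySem

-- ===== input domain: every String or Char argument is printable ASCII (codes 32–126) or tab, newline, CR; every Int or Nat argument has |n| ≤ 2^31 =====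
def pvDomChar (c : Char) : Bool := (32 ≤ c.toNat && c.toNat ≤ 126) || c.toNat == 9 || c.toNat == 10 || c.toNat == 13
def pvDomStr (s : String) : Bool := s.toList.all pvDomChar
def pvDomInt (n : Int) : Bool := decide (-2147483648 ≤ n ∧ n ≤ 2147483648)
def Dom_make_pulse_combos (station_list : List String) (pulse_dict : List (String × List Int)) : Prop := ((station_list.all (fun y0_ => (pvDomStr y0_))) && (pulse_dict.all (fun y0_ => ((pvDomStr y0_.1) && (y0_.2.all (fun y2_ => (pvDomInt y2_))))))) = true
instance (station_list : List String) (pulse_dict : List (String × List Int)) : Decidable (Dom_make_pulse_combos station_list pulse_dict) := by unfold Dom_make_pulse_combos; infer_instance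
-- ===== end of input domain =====

-- B replaces A's iterative rebuild of all partial solutions by a recursion over the
-- station list that computes the tails once and prepends each first-station pulse
-- (objective: alternative decomposition, same output order).

-- dict lookup pulse_dict[sname]: first match in the association list (used by both ports)
def pvLookup (pulse_dict : List (String × List Int)) (sname : String) : List Int :=
  ((pulse_dict.find? (fun kv => kv.1 == sname)).map (·.2)).getD []

-- ===== PORT A =====
def make_pulse_combos (station_list : List String) (pulse_dict : List (String × List Int)) : List (List Int) :=
  station_list.foldl
    (fun solutions sname =>
      solutions.foldl
        (fun new_solutions s =>
          (pvLookup pulse_dict sname).foldl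
            (fun ns new_pulse => ns ++ [s ++ [new_pulse]]) new_solutions)
        [])
    [[]]

-- ===== PORT B =====
def make_pulse_combos_alt (station_list : List String) (pulse_dict : List (String × List Int)) : List (List Int) :=
  match station_list with
  | [] => [[]]
  | first :: rest =>
    let tails := make_pulse_combos_alt rest pulse_dict
    (pvLookup pulse_dict first).flatMap (fun p => tails.map (fun tail => p :: tail))

-- ===== PRECONDITION & SPEC =====
-- Pre_ excludes inputs where some station name is missing from pulse_dict: A raises KeyError there, except when an earlier station has an empty pulse list (solutions already empty, A returns [] without the lookup); B raises KeyError on any missing station.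
def Pre_make_pulse_combos (station_list : List String) (pulse_dict : List (String × List Int)) : Prop :=
  ∀ s ∈ station_list, pulse_dict.any (fun kv => kv.1 == s) = true
instance (station_list : List String) (pulse_dict : List (String × List Int)) : Decidable (Pre_make_pulse_combos station_list pulse_dict) := by unfold Pre_make_pulse_combos; infer_instance
def pvWitness_make_pulse_combos : List String × (List (String × List Int)) :=
  (["a", "b"], [("a", [1, 2]), ("b", [3])])
def Spec_make_pulse_combos (station_list : List String) (pulse_dict : List (String × List Int)) (out : List (List Int)) : Prop := out = make_pulse_combos_alt station_list pulse_dict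
instance (station_list : List String) (pulse_dict : List (String × List Int)) (out : List (List Int)) : Decidable (Spec_make_pulse_combos station_list pulse_dict out) := by unfold Spec_make_pulse_combos; infer_instance

-- ===== CLAIM (what is proved, stated in full; the proofs are below) =====
def Claim_equal_make_pulse_combos : Prop := ∀ (station_list : List String) (pulse_dict : List (String × List Int)), Dom_make_pulse_combos station_list pulse_dict → Pre_make_pulse_combos station_list pulse_dict → Spec_make_pulse_combos station_list pulse_dict (make_pulse_combos station_list pulse_dict)

-- ===== LEMMAS AND PROOFS =====

-- one pass of A's outer loop, as a flatMap
theorem pv_step (pulses : List Int) (sols : List (List Int)) :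
    sols.foldl (fun ns s => pulses.foldl (fun ns2 p => ns2 ++ [s ++ [p]]) ns) [] =
      sols.flatMap (fun s => pulses.map (fun p => s ++ [p])) := by
  have h : ∀ (acc : List (List Int)),
      sols.foldl (fun ns s => pulses.foldl (fun ns2 p => ns2 ++ [s ++ [p]]) ns) acc =
        acc ++ sols.flatMap (fun s => pulses.map (fun p => s ++ [p])) := by
    intro acc
    have : (fun (ns : List (List Int)) (s : List Int) =>
        pulses.foldl (fun ns2 p => ns2 ++ [s ++ [p]]) ns) =
        fun ns s => ns ++ pulses.map (fun p => s ++ [p]) := by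
      funext ns s; exact PySem.List.foldl_append_singleton_eq_map ..
    rw [this, PySem.List.foldl_append_eq_flatMap]
  simpa using h []

-- A's loop over l starting from any set of partial solutions, vs B's recursion
theorem pv_loop (pulse_dict : List (String × List Int)) (l : List String)
    (sols : List (List Int)) :
    l.foldl (fun solutions sname =>
        solutions.foldl (fun ns s =>
          (pvLookup pulse_dict sname).foldl (fun ns2 p => ns2 ++ [s ++ [p]]) ns) [])
      sols =
      sols.flatMap (fun s => (make_pulse_combos_alt l pulse_dict).map (fun t => s ++ t)) := by
  induction l generalizing sols with
  | nil => simp [make_pulse_combos_alt]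
  | cons first rest ih =>
    rw [List.foldl_cons, pv_step, ih]
    simp [make_pulse_combos_alt, List.flatMap_assoc, List.map_flatMap, List.flatMap_map, Function.comp_def,
      List.append_assoc]

-- ===== VERDICT (by name: the statement is the Claim_ definition above) =====
theorem make_pulse_combos_spec : Claim_equal_make_pulse_combos := by
  intro station_list pulse_dict _ _
  unfold Spec_make_pulse_combos make_pulse_combos
  rw [pv_loop]
  simp
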